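-- pv_equiv track=rewrite | github.com/xingbow/seqNLI | backend/app/dataService/utils/helpers.py | get_attr_datatype_shorthand
-- ===== SOURCE A (Python) =====
-- def get_attr_datatype_shorthand(data_types):
--     # Attribute-Datatype pair
--     unsorted_attr_datatype = [(attr, attr_type) for attr, attr_type in data_types.items()]
--
--     # Since the `vis_combo` mapping keys are in a specific order [Q,N,O,T],
--     # we will order the list of attributes in this order
--     default_sort_order = ['Q', 'N', 'O', 'T']
--     sorted_attr_datatype = [(attr, attr_type) for x in default_sort_order for (attr, attr_type) in
--                             unsorted_attr_datatype if attr_type == x]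
--
--     sorted_attributes = [x[0] for x in sorted_attr_datatype]
--     # e.g. ['Rotten Tomatoes Rating', 'Worldwide Gross']
--     sorted_attribute_datatypes = ''.join([x[1] for x in sorted_attr_datatype])  # e.g. 'QQ'
--
--     return sorted_attributes, sorted_attribute_datatypes
-- ===== SOURCE B (Python) =====
-- def get_attr_datatype_shorthand(data_types):
--     # One pass: partition the items into four buckets, one per datatype.
--     q, n, o, t = [], [], [], []
--     for attr, attr_type in data_types.items():
--         if attr_type == 'Q':
--             q.append((attr, attr_type))
--         elif attr_type == 'N':
--             n.append((attr, attr_type))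
--         elif attr_type == 'O':
--             o.append((attr, attr_type))
--         elif attr_type == 'T':
--             t.append((attr, attr_type))
--     merged = q + n + o + t
--     sorted_attributes = [x[0] for x in merged]
--     sorted_attribute_datatypes = ''.join(x[1] for x in merged)
--     return sorted_attributes, sorted_attribute_datatypes
-- ===== Notes on version B (the rewrite author's own statement) =====
-- stated objective: faster
-- what changed: Replaces A's nested comprehension (one full rescan of the items list per datatype) by a single bucketing pass that appends each item to one of four per-type lists and then concatenates them in the fixed Q,N,O,T order.
import Mathlib
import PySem

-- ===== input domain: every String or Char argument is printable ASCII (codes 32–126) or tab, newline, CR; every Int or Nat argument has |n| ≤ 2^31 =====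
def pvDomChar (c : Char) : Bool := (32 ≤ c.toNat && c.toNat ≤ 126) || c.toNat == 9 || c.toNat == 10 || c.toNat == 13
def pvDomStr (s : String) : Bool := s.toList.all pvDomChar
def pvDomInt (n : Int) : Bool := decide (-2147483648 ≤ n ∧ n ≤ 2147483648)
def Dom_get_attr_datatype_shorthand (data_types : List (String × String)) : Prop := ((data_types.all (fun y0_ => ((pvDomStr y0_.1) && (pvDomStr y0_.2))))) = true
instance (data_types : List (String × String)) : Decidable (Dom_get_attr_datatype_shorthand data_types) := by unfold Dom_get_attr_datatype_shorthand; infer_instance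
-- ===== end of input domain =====

-- B replaces A's per-datatype rescans of the items by a single bucketing pass (objective: simpler).


-- ===== PORT A =====
def get_attr_datatype_shorthand (data_types : List (String × String)) : List String × String :=
  let unsorted_attr_datatype := data_types.map (fun p => (p.1, p.2))
  let default_sort_order := ["Q", "N", "O", "T"]
  let sorted_attr_datatype :=
    default_sort_order.flatMap (fun x => unsorted_attr_datatype.filter (fun p => p.2 == x))
  let sorted_attributes := sorted_attr_datatype.map (fun x => x.1)
  let sorted_attribute_datatypes := PySem.Str.join "" (sorted_attr_datatype.map (fun x => x.2))
  (sorted_attributes, sorted_attribute_datatypes)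

-- ===== PORT B =====
-- loop body of B's single bucketing pass: state = the four buckets (q, n, o, t)
def pvBucketStep (st : List (String × String) × List (String × String) × List (String × String) × List (String × String))
    (p : String × String) :
    List (String × String) × List (String × String) × List (String × String) × List (String × String) :=
  match st with
  | (q, n, o, t) =>
    if p.2 == "Q" then (q ++ [(p.1, p.2)], n, o, t)
    else if p.2 == "N" then (q, n ++ [(p.1, p.2)], o, t)
    else if p.2 == "O" then (q, n, o ++ [(p.1, p.2)], t)
    else if p.2 == "T" then (q, n, o, t ++ [(p.1, p.2)])
    else (q, n, o, t)

def get_attr_datatype_shorthand_alt (data_types : List (String × String)) : List String × String :=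
  let st := data_types.foldl pvBucketStep ([], [], [], [])
  let merged := st.1 ++ st.2.1 ++ st.2.2.1 ++ st.2.2.2
  (merged.map (fun x => x.1), PySem.Str.join "" (merged.map (fun x => x.2)))

-- ===== PRECONDITION & SPEC =====
def Spec_get_attr_datatype_shorthand (data_types : List (String × String)) (out : List String × String) : Prop := out = get_attr_datatype_shorthand_alt data_types
instance (data_types : List (String × String)) (out : List String × String) : Decidable (Spec_get_attr_datatype_shorthand data_types out) := by unfold Spec_get_attr_datatype_shorthand; infer_instance

-- ===== CLAIM (what is proved, stated in full; the proofs are below) =====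
def Claim_equal_get_attr_datatype_shorthand : Prop := ∀ (data_types : List (String × String)), Dom_get_attr_datatype_shorthand data_types → Spec_get_attr_datatype_shorthand data_types (get_attr_datatype_shorthand data_types)

-- ===== LEMMAS AND PROOFS =====
-- The bucketing fold appends, to each accumulator bucket, exactly the filter of the input by that datatype.
theorem pvBucketStep_foldl (l : List (String × String))
    (q n o t : List (String × String)) :
    l.foldl pvBucketStep (q, n, o, t) =
      (q ++ l.filter (fun p => p.2 == "Q"), n ++ l.filter (fun p => p.2 == "N"),
       o ++ l.filter (fun p => p.2 == "O"), t ++ l.filter (fun p => p.2 == "T")) := by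
  induction l generalizing q n o t with
  | nil => simp
  | cons hd tl ih =>
    simp only [List.foldl_cons, pvBucketStep, List.filter_cons]
    by_cases hq : hd.2 = "Q"
    · simp [hq, ih]; exact Prod.ext rfl hq.symm
    · by_cases hn : hd.2 = "N"
      · simp [hn, ih]; exact Prod.ext rfl hn.symm
      · by_cases ho : hd.2 = "O"
        · simp [ho, ih]; exact Prod.ext rfl ho.symm
        · by_cases ht : hd.2 = "T"
          · simp [ht, ih]; exact Prod.ext rfl ht.symm
          · simp [hq, hn, ho, ht, ih]

-- ===== VERDICT (by name: the statement is the Claim_ definition above) =====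
theorem get_attr_datatype_shorthand_spec : Claim_equal_get_attr_datatype_shorthand := by
  intro data_types _
  show _ = _
  simp only [get_attr_datatype_shorthand, get_attr_datatype_shorthand_alt,
    pvBucketStep_foldl, List.flatMap_cons, List.flatMap_nil, List.map_id']
  simp
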